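-- pv_equiv track=rewrite | github.com/prompt-general/skysentinel | prediction-engine/features.py | _has_sensitive_tags
-- ===== SOURCE A (Python) =====
-- from typing import Dict, List, Any, Optional
--
-- def _has_sensitive_tags(tags: Dict) -> bool:
--     """Check if tags contain sensitive information"""
--     sensitive_patterns = [
--         'password', 'secret', 'key', 'token', 'credential',
--         'pii', 'phi', 'confidential', 'restricted', 'internal'
--     ]
--
--     for tag_value in tags.values():
--         tag_lower = str(tag_value).lower()
--         if any(pattern in tag_lower for pattern in sensitive_patterns):
--             return True
--
--     return False
-- ===== SOURCE B (Python) =====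
-- _SENSITIVE = ('password', 'secret', 'key', 'token', 'credential',
--               'pii', 'phi', 'confidential', 'restricted', 'internal')
--
-- def _has_sensitive_tags(tags) -> bool:
--     """Check if tags contain sensitive information"""
--     # Position-based scan: walk each lowercased value once and test whether
--     # any sensitive pattern starts at the current index (tuple startswith),
--     # instead of running a separate substring search per pattern.
--     for tag_value in tags.values():
--         s = str(tag_value).lower()
--         for i in range(len(s)):
--             if s.startswith(_SENSITIVE, i):
--                 return True
--     return False
-- ===== Notes on version B (the rewrite author's own statement) =====
-- stated objective: alternative
-- what changed: B replaces A's per-pattern substring ('in') search over each value with a single position-based scan of each lowercased value, testing at every index whether one of the ten patterns starts there via tuple-startswith.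
import Mathlib
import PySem

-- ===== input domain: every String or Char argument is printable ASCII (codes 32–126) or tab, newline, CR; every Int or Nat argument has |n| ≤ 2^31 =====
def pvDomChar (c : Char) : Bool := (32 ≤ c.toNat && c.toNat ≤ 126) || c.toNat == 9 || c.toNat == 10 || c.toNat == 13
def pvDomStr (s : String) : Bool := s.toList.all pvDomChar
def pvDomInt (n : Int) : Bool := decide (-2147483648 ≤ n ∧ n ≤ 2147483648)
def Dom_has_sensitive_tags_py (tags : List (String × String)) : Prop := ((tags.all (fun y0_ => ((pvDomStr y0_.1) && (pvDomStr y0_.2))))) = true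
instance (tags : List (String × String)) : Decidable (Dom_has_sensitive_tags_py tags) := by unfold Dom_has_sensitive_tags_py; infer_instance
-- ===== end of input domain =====

-- B scans each lowercased value position by position, testing whether a pattern
-- starts at the current index, instead of A's per-pattern substring search
-- (objective: alternative algorithm, same cost).

-- ===== PORT A =====
-- A: loop over tags.values(); lowercase; early-return True if any pattern occurs as a substring.
def has_sensitive_tags_py (tags : List (String × String)) : Bool :=
  let sensitive_patterns : List String :=
    ["password", "secret", "key", "token", "credential",
     "pii", "phi", "confidential", "restricted", "internal"]
  (PySem.Dict.ofList tags).values.any (fun tag_value =>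
    let tag_lower := PySem.Str.lower tag_value   -- str(tag_value) is the identity on str
    sensitive_patterns.any (fun pattern => PySem.Str.isIn pattern tag_lower))

-- ===== PORT B =====
-- B's module-level tuple of patterns.
def pvSensitive : List (List Char) :=
  ["password".toList, "secret".toList, "key".toList, "token".toList, "credential".toList,
   "pii".toList, "phi".toList, "confidential".toList, "restricted".toList, "internal".toList]

-- the inner 'for i in range(len(s)): if s.startswith(_SENSITIVE, i)' loop:
-- s.startswith(P, i) is exactly 'some pattern is a prefix of the i-th suffix',
-- so the index loop becomes structural recursion over the suffixes of s.
def pvScanFrom : List Char → Bool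
  | [] => false
  | c :: rest =>
    if pvSensitive.any (fun p => List.isPrefixOf p (c :: rest)) then true
    else pvScanFrom rest

def has_sensitive_tags_py_alt (tags : List (String × String)) : Bool :=
  (PySem.Dict.ofList tags).values.any (fun tag_value =>
    pvScanFrom (PySem.Str.lower tag_value).toList)

-- ===== PRECONDITION & SPEC =====
def Spec_has_sensitive_tags_py (tags : List (String × String)) (out : Bool) : Prop := out = has_sensitive_tags_py_alt tags
instance (tags : List (String × String)) (out : Bool) : Decidable (Spec_has_sensitive_tags_py tags out) := by unfold Spec_has_sensitive_tags_py; infer_instance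

-- ===== CLAIM (what is proved, stated in full; the proofs are below) =====
def Claim_equal_has_sensitive_tags_py : Prop := ∀ (tags : List (String × String)), Dom_has_sensitive_tags_py tags → Spec_has_sensitive_tags_py tags (has_sensitive_tags_py tags)

-- ===== LEMMAS AND PROOFS =====

-- B's position scan finds a pattern iff some pattern is an infix.
theorem pv_scanFrom_iff (cs : List Char) :
    pvScanFrom cs = true ↔ ∃ p ∈ pvSensitive, p <:+: cs := by
  induction cs with
  | nil =>
    simp only [pvScanFrom, Bool.false_eq_true, false_iff]
    rintro ⟨p, hp, hinf⟩
    have hne : p ≠ [] := by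
      have : ∀ q ∈ pvSensitive, q ≠ ([] : List Char) := by decide
      exact this p hp
    exact hne (List.eq_nil_of_infix_nil hinf)
  | cons c rest ih =>
    simp only [pvScanFrom]
    split_ifs with h
    · simp only [true_iff]
      rcases List.any_eq_true.mp h with ⟨p, hp, hpre⟩
      exact ⟨p, hp, (List.isPrefixOf_iff_prefix.mp hpre).isInfix⟩
    · rw [ih]
      constructor
      · rintro ⟨p, hp, hinf⟩; exact ⟨p, hp, hinf.trans (List.infix_cons (List.infix_refl rest))⟩
      · rintro ⟨p, hp, hinf⟩
        rcases (List.infix_cons_iff).mp hinf with hpre | hinf'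
        · exact absurd (List.any_eq_true.mpr ⟨p, hp, by exact List.isPrefixOf_iff_prefix.mpr hpre⟩) h
        · exact ⟨p, hp, hinf'⟩

-- per-value agreement: A's per-pattern substring test equals B's position scan.
theorem pv_value_eq (s : String) :
    (["password", "secret", "key", "token", "credential",
      "pii", "phi", "confidential", "restricted", "internal"] : List String).any
        (fun pattern => PySem.Str.isIn pattern s)
      = pvScanFrom s.toList := by
  rw [Bool.eq_iff_iff, List.any_eq_true, pv_scanFrom_iff]
  constructor
  · rintro ⟨pat, hp, hin⟩
    refine ⟨pat.toList, ?_, (PySem.Str.isIn_iff_infix pat s).mp hin⟩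
    have hall : ∀ q ∈ (["password", "secret", "key", "token", "credential",
        "pii", "phi", "confidential", "restricted", "internal"] : List String),
        q.toList ∈ pvSensitive := by decide
    exact hall pat hp
  · rintro ⟨p, hp, hinf⟩
    have : ∃ pat ∈ (["password", "secret", "key", "token", "credential",
        "pii", "phi", "confidential", "restricted", "internal"] : List String),
        pat.toList = p := by
      have hall : ∀ q ∈ pvSensitive, ∃ pat ∈ (["password", "secret", "key", "token", "credential",
          "pii", "phi", "confidential", "restricted", "internal"] : List String),
          pat.toList = q := by decide
      exact hall p hp
    rcases this with ⟨pat, hpat, rfl⟩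
    exact ⟨pat, hpat, (PySem.Str.isIn_iff_infix pat s).mpr hinf⟩

-- ===== VERDICT (by name: the statement is the Claim_ definition above) =====
theorem has_sensitive_tags_py_spec : Claim_equal_has_sensitive_tags_py := by
  intro tags _
  unfold Spec_has_sensitive_tags_py has_sensitive_tags_py has_sensitive_tags_py_alt
  simp only [pv_value_eq]
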